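-- pv_equiv track=rewrite | github.com/rda-dattore/testpkg | libpkg/src/libpkg/xmlutils.py | xml_split
-- ===== SOURCE A (Python) =====
-- def xml_split(xml):
--     pos = 0
--     bidx = xml.find("<", pos)
--     if bidx != 0:
--         return []
--
--     tlen = len(xml)
--     l = []
--     while pos < tlen and bidx >= 0:
--         if bidx == pos:
--             eidx = xml.find(">", pos)
--             if eidx < 0:
--                 pos = tlen
--             else:
--                 pos = eidx + 1
--
--             l.append(xml[bidx:pos])
--             bidx = xml.find("<", pos)
--         else:
--             l.append(xml[pos:bidx])
--             pos = bidx
--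
--     return l
-- ===== SOURCE B (Python) =====
-- def xml_split(xml):
--     if not xml.startswith("<"):
--         return []
--     # Phase 1: collect tag spans. A tag starts at a '<' and ends just after
--     # the next '>' (or at the end of the string if there is no '>').
--     n = len(xml)
--     spans = []
--     i = 0
--     while i >= 0:
--         e = xml.find(">", i)
--         end = n if e < 0 else e + 1
--         spans.append((i, end))
--         i = xml.find("<", end)
--     # Phase 2: emit tokens; text after the final tag is never emitted.
--     out = []
--     for (s, e), (s2, _) in zip(spans, spans[1:]):
--         out.append(xml[s:e])
--         if e < s2:
--             out.append(xml[e:s2])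
--     out.append(xml[spans[-1][0]:spans[-1][1]])
--     return out
-- ===== Notes on version B (the rewrite author's own statement) =====
-- stated objective: alternative
-- what changed: A interleaves tag and text emission in one stateful while-loop over (pos, bidx); B first collects all tag spans in one pass, then emits each tag and the non-empty gap between consecutive spans in a second zip pass (trailing text after the last tag naturally never emitted).
import Mathlib
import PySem

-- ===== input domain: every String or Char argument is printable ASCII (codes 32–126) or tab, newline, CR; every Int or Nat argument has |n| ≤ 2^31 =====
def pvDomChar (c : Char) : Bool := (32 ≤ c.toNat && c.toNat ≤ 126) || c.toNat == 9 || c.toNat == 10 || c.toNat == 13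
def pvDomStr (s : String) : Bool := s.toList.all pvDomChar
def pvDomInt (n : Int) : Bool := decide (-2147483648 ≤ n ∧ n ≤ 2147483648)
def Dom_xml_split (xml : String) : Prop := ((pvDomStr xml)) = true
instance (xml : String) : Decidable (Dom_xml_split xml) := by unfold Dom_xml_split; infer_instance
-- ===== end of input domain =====

-- B replaces A's single interleaved scanning loop by two phases (collect all tag
-- spans first, then emit tags and the non-empty gaps between consecutive spans);
-- same cost, different structure (objective: alternative). Both are total.

-- ===== PORT A =====
-- A's while-loop; the fuel only makes the recursion structural (pos strictly
-- increases each iteration, so fuel = len+1 is never exhausted).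
def xmlSplitLoopA (xml : String) (tlen : Int) : Nat → Int → Int → List String → List String
  | 0, _, _, l => l
  | fuel+1, pos, bidx, l =>
    if pos < tlen ∧ 0 ≤ bidx then
      if bidx = pos then
        let eidx := PySem.Str.findFrom xml ">" pos
        let pos' := if eidx < 0 then tlen else eidx + 1
        xmlSplitLoopA xml tlen fuel pos' (PySem.Str.findFrom xml "<" pos')
          (l ++ [PySem.Str.slice xml (some bidx) (some pos')])
      else
        xmlSplitLoopA xml tlen fuel bidx bidx (l ++ [PySem.Str.slice xml (some pos) (some bidx)])
    else l

def xml_split (xml : String) : List String :=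
  let bidx := PySem.Str.findFrom xml "<" 0
  if bidx ≠ 0 then []
  else xmlSplitLoopA xml (PySem.Str.len xml) (xml.toList.length + 1) 0 bidx []

-- ===== PORT B =====
-- Phase 1 of Source B: the list of tag spans.  The fuel only makes the while-loop
-- structural (i strictly increases, so fuel = len+1 is never exhausted).
def xmlSpansB (xml : String) (n : Int) : Nat → Int → List (Int × Int)
  | 0, _ => []
  | fuel+1, i =>
    if 0 ≤ i then
      let e := PySem.Str.findFrom xml ">" i
      let endd := if e < 0 then n else e + 1
      (i, endd) :: xmlSpansB xml n fuel (PySem.Str.findFrom xml "<" endd)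
    else []

-- Phase 2 of Source B: zip-fold over consecutive span pairs, then the last tag.
-- spans[-1] cannot fail in Source B (spans is nonempty); `getLast?.elim ""` ports it.
def xml_split_alt (xml : String) : List String :=
  if ¬ PySem.Str.startswith xml "<" then []
  else
    let n := PySem.Str.len xml
    let spans := xmlSpansB xml n (xml.toList.length + 1) 0
    let out := (spans.zip spans.tail).foldl
      (fun out sp =>
        let t := out ++ [PySem.Str.slice xml (some sp.1.1) (some sp.1.2)]
        if sp.1.2 < sp.2.1 then t ++ [PySem.Str.slice xml (some sp.1.2) (some sp.2.1)] else t) []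
    out ++ [spans.getLast?.elim "" (fun sp => PySem.Str.slice xml (some sp.1) (some sp.2))]

-- ===== PRECONDITION & SPEC =====
def Spec_xml_split (xml : String) (out : List String) : Prop := out = xml_split_alt xml
instance (xml : String) (out : List String) : Decidable (Spec_xml_split xml out) := by unfold Spec_xml_split; infer_instance

-- ===== CLAIM (what is proved, stated in full; the proofs are below) =====
def Claim_equal_xml_split : Prop := ∀ (xml : String), Dom_xml_split xml → Spec_xml_split xml (xml_split xml)

-- ===== LEMMAS AND PROOFS =====

-- [c] is a prefix of l iff l starts with c
lemma singleton_prefix_iff {c : Char} {l : List Char} : [c] <+: l ↔ l.head? = some c := by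
  cases l with
  | nil => simp
  | cons a t => simp [List.cons_prefix_cons, eq_comm]

-- What Python's s.find(c, k) means for a single character, in closed form.
lemma findFrom_char_cases (cs : List Char) (c : Char) (k : Nat) (hk : k ≤ cs.length) :
    (PySem.Chars.findFrom cs [c] (k : Int) = -1 ∧ ∀ j, k ≤ j → cs[j]? ≠ some c) ∨
    (∃ r : Nat, PySem.Chars.findFrom cs [c] (k : Int) = (r : Int) ∧ k ≤ r ∧ r < cs.length ∧
      cs[r]? = some c ∧ ∀ j, k ≤ j → j < r → cs[j]? ≠ some c) := by
  by_cases h : PySem.Chars.findFrom cs [c] (k : Int) = -1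
  · left
    refine ⟨h, ?_⟩
    have hni := (PySem.Chars.findFrom_natCast_eq_neg_one_iff cs [c] k hk).mp h
    intro j hj hc
    apply hni
    have hpre : [c] <+: cs.drop j := by
      rw [singleton_prefix_iff, List.head?_drop]; exact hc
    have : cs.drop j = (cs.drop k).drop (j - k) := by
      rw [List.drop_drop]; congr 1; omega
    rw [this] at hpre
    exact hpre.isInfix.trans (List.drop_suffix _ _).isInfix
  · right
    obtain ⟨hle, hpre, hmin⟩ := PySem.Chars.findFrom_natCast_spec cs [c] k hk h
    set r := PySem.Chars.findFrom cs [c] (k : Int) with hr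
    have h0 : 0 ≤ r := le_trans (by exact_mod_cast Int.natCast_nonneg k) hle
    refine ⟨r.toNat, by omega, by omega, ?_, ?_, ?_⟩
    · rw [singleton_prefix_iff, List.head?_drop] at hpre
      have : r.toNat < cs.length := by
        by_contra hge
        rw [List.getElem?_eq_none (by omega)] at hpre; simp at hpre
      exact this
    · rw [singleton_prefix_iff, List.head?_drop] at hpre; exact hpre
    · intro j hkj hjr hcj
      apply hmin j hkj (by omega)
      rw [singleton_prefix_iff, List.head?_drop]; exact hcj

-- the canonical token list of a span list (tag, then the non-empty gap to the next span)
def emitSpans (xml : String) : List (Int × Int) → List String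
  | [] => []
  | [sp] => [PySem.Str.slice xml (some sp.1) (some sp.2)]
  | sp :: sp2 :: rest =>
      PySem.Str.slice xml (some sp.1) (some sp.2) ::
        ((if sp.2 < sp2.1 then [PySem.Str.slice xml (some sp.2) (some sp2.1)] else []) ++
          emitSpans xml (sp2 :: rest))

-- B's phase 2 (zip-fold plus final tag) computes emitSpans on a nonempty span list.
lemma alt_emit (xml : String) (spans : List (Int × Int)) (hne : spans ≠ []) :
    ((spans.zip spans.tail).foldl
      (fun out sp =>
        let t := out ++ [PySem.Str.slice xml (some sp.1.1) (some sp.1.2)]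
        if sp.1.2 < sp.2.1 then t ++ [PySem.Str.slice xml (some sp.1.2) (some sp.2.1)] else t) [])
      ++ [spans.getLast?.elim "" (fun sp => PySem.Str.slice xml (some sp.1) (some sp.2))]
    = emitSpans xml spans := by
  have hfold : ∀ (ps : List ((Int × Int) × (Int × Int))) (acc : List String),
      ps.foldl (fun out sp =>
        let t := out ++ [PySem.Str.slice xml (some sp.1.1) (some sp.1.2)]
        if sp.1.2 < sp.2.1 then t ++ [PySem.Str.slice xml (some sp.1.2) (some sp.2.1)] else t) acc
      = acc ++ ps.flatMap (fun sp =>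
          [PySem.Str.slice xml (some sp.1.1) (some sp.1.2)] ++
          (if sp.1.2 < sp.2.1 then [PySem.Str.slice xml (some sp.1.2) (some sp.2.1)] else [])) := by
    intro ps acc
    rw [← PySem.List.foldl_append_eq_flatMap]
    congr 1
    funext b x
    by_cases h : x.1.2 < x.2.1 <;> simp [h]
  rw [hfold]
  induction spans with
  | nil => exact absurd rfl hne
  | cons sp rest ih =>
    cases rest with
    | nil => simp [emitSpans]
    | cons sp2 rest' =>
      have := ih (by simp)
      simp only [List.tail_cons, List.zip_cons_cons, List.flatMap_cons, List.nil_append] at this ⊢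
      rw [emitSpans]
      simp only [List.getLast?_cons_cons] at this ⊢
      rw [List.append_assoc, this]
      simp

-- A's loop stops as soon as its guard fails, whatever the fuel.
lemma loopA_stop (xml : String) (tlen : Int) (fuel : Nat) (pos bidx : Int) (l : List String)
    (h : ¬(pos < tlen ∧ 0 ≤ bidx)) : xmlSplitLoopA xml tlen fuel pos bidx l = l := by
  cases fuel with
  | zero => rw [xmlSplitLoopA]
  | succ f => rw [xmlSplitLoopA, if_neg h]

-- B's span loop stops on a negative index, whatever the fuel.
lemma spansB_stop (xml : String) (n : Int) (fuel : Nat) (i : Int) (h : ¬(0 ≤ i)) :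
    xmlSpansB xml n fuel i = [] := by
  cases fuel with
  | zero => rw [xmlSpansB]
  | succ f => rw [xmlSpansB, if_neg h]

-- With fuel left and a nonnegative index, the span list starts with a span at i.
lemma spansB_head (xml : String) (n : Int) (fuel : Nat) (i : Int) (h : 0 ≤ i) :
    ∃ E rest, xmlSpansB xml n (fuel+1) i = (i, E) :: rest := by
  rw [xmlSpansB, if_pos h]; exact ⟨_, _, rfl⟩

lemma emitSpans_cons_cons (xml : String) (sp sp2 : Int × Int) (rest : List (Int × Int)) :
    emitSpans xml (sp :: sp2 :: rest) =
      PySem.Str.slice xml (some sp.1) (some sp.2) ::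
        ((if sp.2 < sp2.1 then [PySem.Str.slice xml (some sp.2) (some sp2.1)] else []) ++
          emitSpans xml (sp2 :: rest)) := by
  rw [emitSpans]

-- A's loop, entered at a tag start, produces exactly the tokens of B's span list.
lemma main_loop (xml : String) :
    ∀ (k pos fa fb : Nat) (l : List String),
      xml.toList.length - pos = k →
      pos < xml.toList.length →
      xml.toList[pos]? = some '<' →
      xml.toList.length - pos < fa →
      xml.toList.length - pos < fb →
      xmlSplitLoopA xml (PySem.Str.len xml) fa (pos : Int) (pos : Int) l
        = l ++ emitSpans xml (xmlSpansB xml (PySem.Str.len xml) fb (pos : Int)) := by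
  intro k
  induction k using Nat.strong_induction_on with
  | _ k ih =>
  intro pos fa fb l hk hpos hc hfa hfb
  obtain ⟨fa', rfl⟩ : ∃ fa', fa = fa' + 1 := ⟨fa - 1, by omega⟩
  obtain ⟨fb', rfl⟩ : ∃ fb', fb = fb' + 1 := ⟨fb - 1, by omega⟩
  obtain ⟨fa2, rfl⟩ : ∃ x, fa' = x + 1 := ⟨fa' - 1, by omega⟩
  have hlen : PySem.Str.len xml = (xml.toList.length : Int) := by simp [pysem]
  set cs := xml.toList with hcs
  set n := cs.length with hn
  rw [xmlSplitLoopA, xmlSpansB]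
  simp only []
  rw [if_pos ⟨by rw [hlen]; exact_mod_cast hpos, by positivity⟩, if_pos trivial,
    if_pos (by positivity : (0:Int) ≤ (pos : Int))]
  simp only [PySem.Str.findFrom_eq]
  have hgt : ">".toList = ['>'] := rfl
  have hlt : "<".toList = ['<'] := rfl
  rw [hgt, hlt, ← hcs]
  rcases findFrom_char_cases cs '>' pos (by omega) with ⟨he, hnone⟩ | ⟨r, he, hkr, hrn, hcr, hmin⟩
  · -- no '>' from pos: tag is the rest of the string; next find from n is -1
    rw [he, if_pos (by norm_num), hlen]
    have h2 : PySem.Chars.findFrom cs ['<'] ((n:Nat) : Int) = -1 := by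
      rcases findFrom_char_cases cs '<' n (le_refl n) with ⟨h, _⟩ | ⟨r, _, _, hrn, _, _⟩
      · exact h
      · omega
    rw [h2]
    rw [loopA_stop _ _ _ _ _ _ (by rintro ⟨h1, h2⟩; omega),
      spansB_stop _ _ _ _ (by norm_num)]
    simp [emitSpans]
  · -- '>' found at r
    rw [he, if_neg (by omega)]
    have hcast : (r : Int) + 1 = ((r + 1 : Nat) : Int) := by push_cast; ring
    rw [hcast]
    rcases findFrom_char_cases cs '<' (r+1) (by omega) with ⟨hb, hnone2⟩ | ⟨b, hbeq, hkb, hbn, hcb, hminb⟩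
    · -- no further '<': A's guard fails, B's span list ends
      rw [hb, loopA_stop _ _ _ _ _ _ (by rintro ⟨h1, h2⟩; omega),
        spansB_stop _ _ _ _ (by norm_num)]
      simp [emitSpans]
    · -- next '<' at b
      rw [hbeq]
      obtain ⟨fc, rfl⟩ : ∃ fc, fb' = fc + 1 := ⟨fb' - 1, by omega⟩
      obtain ⟨E, rest, hspan⟩ := spansB_head xml (PySem.Str.len xml) fc ((b : Nat) : Int) (by positivity)
      by_cases hbe : b = r + 1
      · -- tag immediately follows: A loops straight into the next tag
        subst hbe
        rw [ih (n - (r+1)) (by omega) (r+1) (fa2+1) (fc+1) _ rfl hbn hcb (by omega) (by omega)]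
        rw [hspan, emitSpans_cons_cons]
        simp
      · -- text gap between r+1 and b
        have hlt2 : r + 1 < b := by omega
        rw [xmlSplitLoopA, if_pos ⟨by rw [hlen]; exact_mod_cast (by omega : r+1 < n), by positivity⟩,
          if_neg (by intro h; exact hbe (by exact_mod_cast h))]
        rw [ih (n - b) (by omega) b fa2 (fc+1) _ rfl hbn hcb (by omega) (by omega)]
        rw [hspan, emitSpans_cons_cons, if_pos (by show ((r+1:Nat):Int) < ((b:Nat):Int); exact_mod_cast hlt2)]
        simp

theorem xml_split_eq (xml : String) : xml_split xml = xml_split_alt xml := by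
  unfold xml_split xml_split_alt
  simp only [PySem.Str.findFrom_eq]
  have hlt : "<".toList = ['<'] := rfl
  rw [hlt]
  set cs := xml.toList with hcs
  set n := cs.length with hn
  by_cases h0 : cs[0]? = some '<'
  · have hpos : 0 < n := by
      by_contra h
      rw [List.getElem?_eq_none (by omega)] at h0; simp at h0
    have hfind0 : PySem.Chars.findFrom cs ['<'] ((0:Nat) : Int) = 0 := by
      rcases findFrom_char_cases cs '<' 0 (by omega) with ⟨_, hno⟩ | ⟨r, hr, _, _, _, hmin⟩
      · exact absurd h0 (hno 0 (by omega))
      · rcases Nat.eq_zero_or_pos r with hr0 | hrpos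
        · rw [hr, hr0]; rfl
        · exact absurd h0 (hmin 0 (by omega) hrpos)
    rw [show ((0:Nat):Int) = (0:Int) by norm_num] at hfind0
    have hswt : PySem.Chars.startswith xml.toList ['<'] = true := by
      rw [PySem.Chars.startswith_iff, singleton_prefix_iff, List.head?_eq_getElem?]
      exact h0
    rw [hfind0, if_neg (by simp), if_neg (by simp [hswt])]
    obtain ⟨E, rest, hspan⟩ := spansB_head xml (PySem.Str.len xml) n 0 (le_refl 0)
    rw [show cs.length + 1 = n + 1 from rfl]
    rw [alt_emit xml _ (by rw [hspan]; simp)]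
    have := main_loop xml n 0 (n+1) (n+1) [] (by omega) hpos h0
      (by show xml.toList.length - 0 < xml.toList.length + 1; omega)
      (by show xml.toList.length - 0 < xml.toList.length + 1; omega)
    simpa using this
  · have hne : PySem.Chars.findFrom cs ['<'] (0:Int) ≠ 0 := by
      rcases findFrom_char_cases cs '<' 0 (by omega) with ⟨hneg, _⟩ | ⟨r, hr, _, _, hcr, _⟩
      · rw [show ((0:Nat):Int) = (0:Int) by norm_num] at hneg; rw [hneg]; norm_num
      · rw [show ((0:Nat):Int) = (0:Int) by norm_num] at hr
        rw [hr]
        intro hcon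
        have : r = 0 := by exact_mod_cast hcon
        exact h0 (this ▸ hcr)
    have hswf : PySem.Chars.startswith xml.toList ['<'] = false := by
      rw [Bool.eq_false_iff]
      intro h
      rw [PySem.Chars.startswith_iff, singleton_prefix_iff, List.head?_eq_getElem?] at h
      exact h0 h
    rw [if_pos hne, if_pos (by simp [hswf])]

-- ===== VERDICT (by name: the statement is the Claim_ definition above) =====
theorem xml_split_spec : Claim_equal_xml_split := by
  intro xml _
  unfold Spec_xml_split
  exact xml_split_eq xml
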